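-- pv_equiv track=rewrite | github.com/QuadraticOne/CS-Coding-Challenge | q1.py | group_by_leading_bits
-- ===== SOURCE A (Python) =====
-- def group_by_leading_bits(ns, k_max=4):
--   """
--   [Int] -> Int? -> Dict Int [Int]
--   Groups the integers in the list by the value of their first k bits.
--   """
--   k = min(k_max, most_bits(ns))
--   groups = {}
--   for n in ns:
--     leading_value = leading_bits_value(n, k, 16)
--     if leading_value in groups:
--       groups[leading_value].append(n)
--     else:
--       groups[leading_value] = [n]
--   return groups
--
-- def most_bits(ns):
--   """
--   [Int] -> Int
--   Find the length, in bits, of the largest value in the list.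
--   """
--   return max([len(bin(n)) - 2 for n in ns])
--
-- def leading_bits_value(n, k, pad_to_l_bits):
--   """
--   Int -> Int -> Int
--   Pad the binary representation of the given integer to l bits
--   if it is less than that length, then extract the value of the
--   leading k bits.
--   """
--   bits = bin(n)[2:]
--   bits = ('0' * (pad_to_l_bits - len(bits))) + bits
--   return int(bits[:k], 2)
-- ===== SOURCE B (Python) =====
-- def group_by_leading_bits(ns, k_max=4):
--   """
--   [Int] -> Int? -> Dict Int [Int]
--   Groups the integers in the list by the value of their first k bits,
--   computed arithmetically (shifts) instead of via binary strings.
--   """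
--   k = min(k_max, max((n.bit_length() or 1) for n in ns))
--   def leading(n):
--     return n >> max(0, max(16, n.bit_length() or 1) - k)
--   keys = list(dict.fromkeys(leading(n) for n in ns))
--   return {key: [n for n in ns if leading(n) == key] for key in keys}
-- ===== Notes on version B (the rewrite author's own statement) =====
-- stated objective: alternative
-- what changed: B computes each leading-k-bits key arithmetically (bit_length and a right shift) instead of formatting, padding and re-parsing binary strings, and builds the result by one comprehension per first-occurrence-deduplicated key instead of A's incremental dict-append loop.
-- outside the precondition, e.g. on group_by_leading_bits([-5], 4): A returns {0: [-5]}, B returns {-1: [-5]}; on group_by_leading_bits([70000], -1): A returns {35000: [70000]}, B returns {0: [70000]}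
import Mathlib
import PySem

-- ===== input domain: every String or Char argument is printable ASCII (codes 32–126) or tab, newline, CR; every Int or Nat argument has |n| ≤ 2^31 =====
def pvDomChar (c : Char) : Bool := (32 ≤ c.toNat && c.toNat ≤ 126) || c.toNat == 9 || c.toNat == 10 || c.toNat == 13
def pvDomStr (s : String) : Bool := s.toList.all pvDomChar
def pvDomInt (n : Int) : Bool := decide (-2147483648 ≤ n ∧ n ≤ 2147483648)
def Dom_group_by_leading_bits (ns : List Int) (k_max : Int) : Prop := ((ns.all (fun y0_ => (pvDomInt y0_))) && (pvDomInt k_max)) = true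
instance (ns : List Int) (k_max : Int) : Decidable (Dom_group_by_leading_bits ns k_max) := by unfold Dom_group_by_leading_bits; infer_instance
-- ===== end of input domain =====

-- B groups by an arithmetically computed key (bit_length and shifts, no binary strings)
-- and builds each group by one comprehension per distinct first-occurrence key; objective: alternative.

-- ===== PORT A =====

-- binary digits of a natural number, MSB first (empty for 0); fuel 64 covers |n| ≤ 2^31
def pvBitsAux : Nat → Nat → List Char
  | 0, _ => []
  | fuel+1, n => if n = 0 then [] else pvBitsAux fuel (n / 2) ++ [if n % 2 = 1 then '1' else '0']

def pvBinDigits (n : Nat) : List Char := if n = 0 then ['0'] else pvBitsAux 64 n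

-- hand port of Python's bin(n) as a list of chars; exact for |n| < 2^64
def pvPyBin (n : Int) : List Char :=
  if n < 0 then '-' :: '0' :: 'b' :: pvBinDigits (-n).toNat else '0' :: 'b' :: pvBinDigits n.toNat

-- hand port of int(s, 2); exact for the strings that occur here (chars drawn from '0','1','b','-',
-- no leading/trailing space, sign or underscore): none = ValueError
def pvIntOfBin? (l : List Char) : Option Int :=
  if l ≠ [] ∧ l.all (fun c => c == '0' || c == '1')
  then some (l.foldl (fun a c => 2 * a + (if c == '1' then 1 else 0)) 0) else none

def pv_most_bits (ns : List Int) : Int :=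
  -- max([...]); none = ValueError on the empty list, excluded by Pre_
  (PySem.List.max? (ns.map (fun n => ((pvPyBin n).length : Int) - 2)) (fun x => x)).getD 0

def pv_leading_bits_value (n k pad_to_l_bits : Int) : Int :=
  let bits := PySem.List.slice (pvPyBin n) (some 2) none          -- bin(n)[2:]
  let bits := List.replicate (pad_to_l_bits - (bits.length : Int)).toNat '0' ++ bits  -- '0'*(l-len) + bits
  (pvIntOfBin? (PySem.List.slice bits none (some k))).getD 0      -- int(bits[:k], 2); none = ValueError, excluded by Pre_

def group_by_leading_bits (ns : List Int) (k_max : Int) : List (Int × List Int) :=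
  let k := min k_max (pv_most_bits ns)
  let groups := ns.foldl (fun g n =>
    let leading_value := pv_leading_bits_value n k 16
    if g.contains leading_value
    then g.modify leading_value [] (fun l => l ++ [n])            -- groups[lv].append(n)
    else g.insert leading_value [n])                              -- groups[lv] = [n]
    (PySem.Dict.empty)
  groups.items

-- ===== PORT B =====

-- hand port of Python's n.bit_length(); exact for |n| < 2^64
def pvBitLenAux : Nat → Nat → Nat
  | 0, _ => 0
  | fuel+1, n => if n = 0 then 0 else pvBitLenAux fuel (n / 2) + 1

def pvBitLength (n : Int) : Int := (pvBitLenAux 64 n.natAbs : Int)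

-- n.bit_length() or 1
def pvBitLen1 (n : Int) : Int := if pvBitLength n = 0 then 1 else pvBitLength n

-- n >> max(0, max(16, n.bit_length() or 1) - k)  (the shift amount is ≥ 0)
def pvAltLeading (k n : Int) : Int := n >>> (max 0 (max 16 (pvBitLen1 n) - k)).toNat

def group_by_leading_bits_alt (ns : List Int) (k_max : Int) : List (Int × List Int) :=
  let k := min k_max ((PySem.List.max? (ns.map pvBitLen1) (fun x => x)).getD 0)  -- none = ValueError on [], excluded by Pre_
  let keys := PySem.List.dedup (ns.map (pvAltLeading k))          -- list(dict.fromkeys(...))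
  (keys.foldl (fun d key =>
      d.insert key (ns.foldl (fun acc n => if pvAltLeading k n == key then acc ++ [n] else acc) []))
    (PySem.Dict.empty)).items

-- ===== PRECONDITION & SPEC =====
-- Pre_ restricts to the function's natural domain: a nonempty list of nonnegative integers and k_max ≥ 1.
-- Outside it A raises (ValueError: max() on the empty list; int('', 2) when k_max ≤ 0; int on the stray
-- 'b' that bin() leaves for a negative n once k reaches it) or, on some negative/small-k corners, returns
-- an accidental value produced by slicing into bin()'s '-0b' prefix.
def Pre_group_by_leading_bits (ns : List Int) (k_max : Int) : Prop :=
  ns ≠ [] ∧ (∀ n ∈ ns, 0 ≤ n) ∧ 1 ≤ k_max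
instance (ns : List Int) (k_max : Int) : Decidable (Pre_group_by_leading_bits ns k_max) := by
  unfold Pre_group_by_leading_bits; infer_instance

def pvWitness_group_by_leading_bits : List Int × Int := ([3, 9, 9, 70000, 0], 4)

def Spec_group_by_leading_bits (ns : List Int) (k_max : Int) (out : List (Int × List Int)) : Prop := out = group_by_leading_bits_alt ns k_max
instance (ns : List Int) (k_max : Int) (out : List (Int × List Int)) : Decidable (Spec_group_by_leading_bits ns k_max out) := by unfold Spec_group_by_leading_bits; infer_instance

-- ===== CLAIM (what is proved, stated in full; the proofs are below) =====
def Claim_equal_group_by_leading_bits : Prop := ∀ (ns : List Int) (k_max : Int), Dom_group_by_leading_bits ns k_max → Pre_group_by_leading_bits ns k_max → Spec_group_by_leading_bits ns k_max (group_by_leading_bits ns k_max)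

-- ===== LEMMAS AND PROOFS =====

-- abbreviation for the bit parser used by pvIntOfBin?
def pvParse (l : List Char) : Int := l.foldl (fun a c => 2 * a + (if c == '1' then 1 else 0)) 0

theorem pvParse_go (l : List Char) : ∀ a : Int,
    l.foldl (fun a c => 2 * a + (if c == '1' then 1 else 0)) a = a * 2 ^ l.length + pvParse l := by
  induction l with
  | nil => intro a; simp [pvParse]
  | cons c t ih =>
    intro a
    simp only [List.foldl_cons, List.length_cons, pvParse]
    rw [ih, ih (2 * 0 + _)]
    ring

theorem pvParse_append (l1 l2 : List Char) :
    pvParse (l1 ++ l2) = pvParse l1 * 2 ^ l2.length + pvParse l2 := by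
  simp only [pvParse, List.foldl_append]
  rw [pvParse_go l2]
  rfl

theorem pvParse_nonneg (l : List Char) : 0 ≤ pvParse l := by induction l using List.reverseRecOn with
  | nil => simp [pvParse]
  | append_singleton t c ih =>
    rw [pvParse_append]
    have : (0:Int) ≤ pvParse [c] := by simp [pvParse]; split <;> norm_num
    positivity

theorem pvParse_lt (l : List Char) : pvParse l < 2 ^ l.length := by induction l using List.reverseRecOn with
  | nil => simp [pvParse]
  | append_singleton t c ih =>
    rw [pvParse_append]
    have h1 : pvParse [c] ≤ 1 := by simp [pvParse]; split <;> norm_num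
    simp only [List.length_append, List.length_cons, List.length_nil]
    have h2 : (2:Int) ^ (t.length + 1) = 2 ^ t.length * 2 := by ring
    rw [h2]
    norm_num
    nlinarith [pvParse_nonneg [c], (by positivity : (0:Int) < 2 ^ t.length)]

theorem pvParse_replicate_zero (z : Nat) : pvParse (List.replicate z '0') = 0 := by induction z with
  | zero => simp [pvParse]
  | succ m ih =>
    rw [List.replicate_succ, show ('0' :: List.replicate m '0') = ['0'] ++ List.replicate m '0' from rfl,
        pvParse_append, ih]
    simp [pvParse]

theorem pvBitsAux_len (fuel : Nat) : ∀ n : Nat, (pvBitsAux fuel n).length = pvBitLenAux fuel n := by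
  induction fuel with
  | zero => intro n; simp [pvBitsAux, pvBitLenAux]
  | succ f ih =>
    intro n
    simp only [pvBitsAux, pvBitLenAux]
    split
    · simp
    · simp [ih]

theorem pvBitsAux_valid (fuel : Nat) : ∀ n : Nat,
    (pvBitsAux fuel n).all (fun c => c == '0' || c == '1') = true := by
  induction fuel with
  | zero => intro n; simp [pvBitsAux]
  | succ f ih =>
    intro n
    simp only [pvBitsAux]
    split
    · simp
    · simp only [List.all_append, ih, Bool.true_and, List.all_cons, List.all_nil, Bool.and_true]
      split <;> simp

theorem pvBitsAux_parse (fuel : Nat) : ∀ n : Nat, n < 2 ^ fuel → pvParse (pvBitsAux fuel n) = (n : Int) := by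
  induction fuel with
  | zero => intro n h; interval_cases n; simp [pvBitsAux, pvParse]
  | succ f ih =>
    intro n h
    simp only [pvBitsAux]
    split
    · simp [pvParse]; omega
    · rw [pvParse_append, ih (n / 2) (by omega)]
      have h2 : pvParse [if n % 2 = 1 then '1' else '0'] = ((n % 2 : Nat) : Int) := by
        rcases Nat.mod_two_eq_zero_or_one n with h' | h' <;> simp [h', pvParse]
      rw [h2]
      simp only [List.length_singleton, pow_one]
      omega

theorem pvBinDigits_valid (n : Nat) :
    (pvBinDigits n).all (fun c => c == '0' || c == '1') = true := by
  unfold pvBinDigits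
  split
  · simp
  · exact pvBitsAux_valid 64 n

theorem pvBinDigits_parse (n : Nat) (h : n < 2 ^ 64) : pvParse (pvBinDigits n) = (n : Int) := by
  unfold pvBinDigits
  split
  · simp_all [pvParse]
  · exact pvBitsAux_parse 64 n h

theorem pvBitLenAux_pos (fuel n : Nat) (hf : fuel ≠ 0) (hn : n ≠ 0) : pvBitLenAux fuel n ≠ 0 := by
  obtain ⟨f, rfl⟩ := Nat.exists_eq_succ_of_ne_zero hf
  simp [pvBitLenAux, hn]

theorem pvBinDigits_len (n : Nat) (h : n < 2 ^ 64) :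
    ((pvBinDigits n).length : Int) = pvBitLen1 (n : Int) := by
  unfold pvBinDigits pvBitLen1 pvBitLength
  rw [Int.natAbs_natCast]
  by_cases hn : n = 0
  · subst hn; simp [pvBitLenAux]
  · have h1 : pvBitLenAux 64 n ≠ 0 := pvBitLenAux_pos 64 n (by norm_num) hn
    simp only [hn, if_false, pvBitsAux_len]
    rw [if_neg (by exact_mod_cast h1)]

-- the per-element agreement: on a nonnegative n (within the 64-bit fuel) and k ≥ 1,
-- A's string extraction equals B's shift
theorem pvLeading_eq (n k : Int) (hn : 0 ≤ n) (hn' : n < 2 ^ 64) (hk : 1 ≤ k) :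
    pv_leading_bits_value n k 16 = pvAltLeading k n := by
  have hn64 : n.toNat < 2 ^ 64 := by omega
  have hbin : pvPyBin n = '0' :: 'b' :: pvBinDigits n.toNat := by
    simp [pvPyBin, not_lt.mpr hn]
  set s : List Char := pvBinDigits n.toNat with hs
  have hb1 : 1 ≤ s.length := by
    rw [hs]; unfold pvBinDigits
    split
    · simp
    · rename_i hne
      have := pvBitsAux_len 64 n.toNat
      have := pvBitLenAux_pos 64 n.toNat (by norm_num) hne
      omega
  -- unfold A's computation
  simp only [pv_leading_bits_value, hbin, PySem.List.slice_from _ (by norm_num : (0:Int) ≤ 2),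
      show ((2:Int).toNat) = 2 from rfl, List.drop_succ_cons, List.drop_zero]
  set z : Nat := ((16 : Int) - (s.length : Int)).toNat with hz
  set padded : List Char := List.replicate z '0' ++ s with hpadded
  have hm : padded.length = z + s.length := by simp [hpadded]
  have hm16 : 1 ≤ padded.length := by omega
  set t : Nat := k.toNat with ht
  have ht1 : 1 ≤ t := by omega
  rw [PySem.List.slice_to _ (by omega : (0:Int) ≤ k)]
  -- the taken prefix is a nonempty valid bit string
  have hvalid : padded.all (fun c => c == '0' || c == '1') = true := by
    simp only [hpadded, List.all_append]
    refine (Bool.and_eq_true _ _).mpr ⟨?_, ?_⟩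
    · simp
    · exact pvBinDigits_valid n.toNat
  have hvalid' : (padded.take t).all (fun c => c == '0' || c == '1') = true := by
    rw [List.all_eq_true] at hvalid ⊢
    exact fun x hx => hvalid x (List.take_subset t padded hx)
  have hne' : padded.take t ≠ [] := by
    rw [Ne, List.take_eq_nil_iff]
    push Not
    refine ⟨by omega, by intro hnil; rw [hnil] at hm; simp at hm; omega⟩
  rw [show pvIntOfBin? (padded.take t) = some (pvParse (padded.take t)) by
    simp only [pvIntOfBin?, pvParse]
    rw [if_pos ⟨hne', hvalid'⟩]]
  simp only [Option.getD_some]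
  -- value of the prefix = n / 2^(length of the dropped suffix)
  set e : Nat := padded.length - t with he
  have hlen_drop : (padded.drop t).length = e := by simp [he]
  have hval : pvParse padded = (n.toNat : Int) := by
    simp only [hpadded]
    rw [pvParse_append, pvParse_replicate_zero, pvBinDigits_parse n.toNat hn64]
    ring
  have hsplitv : (n.toNat : Int) = pvParse (padded.drop t) + pvParse (padded.take t) * 2 ^ e := by
    rw [← hval]
    conv_lhs => rw [← List.take_append_drop t padded]
    rw [pvParse_append, hlen_drop]
    ring
  have hq : pvParse (padded.take t) = (n.toNat : Int) / 2 ^ e := by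
    rw [hsplitv, Int.add_mul_ediv_right _ _ (by positivity : (2:Int) ^ e ≠ 0),
        Int.ediv_eq_zero_of_lt (pvParse_nonneg _) (by rw [← hlen_drop]; exact pvParse_lt _)]
    ring
  rw [hq]
  -- B's side
  unfold pvAltLeading
  have hbl : pvBitLen1 n = (s.length : Int) := by
    rw [show n = ((n.toNat : Nat) : Int) by omega, ← pvBinDigits_len n.toNat hn64]
  have hS : (max 0 (max 16 (pvBitLen1 n) - k)).toNat = e := by
    rw [hbl]
    omega
  rw [hS, show n = ((n.toNat : Nat) : Int) by omega]
  have hshift : (((n.toNat : Nat) : Int)) >>> e = (((n.toNat >>> e : Nat)) : Int) := by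
    simp
  rw [hshift, Nat.shiftRight_eq_div_pow]
  push_cast
  rfl

-- A's grouping loop, in closed form, for an arbitrary key function
theorem pvGroupA_items (f : Int → Int) (ns : List Int) :
    (ns.foldl (fun g n =>
        let lv := f n
        if g.contains lv then g.modify lv [] (fun l => l ++ [n]) else g.insert lv [n])
      (PySem.Dict.empty)).items
    = (PySem.List.dedup (ns.map f)).map (fun key => (key, ns.filter (fun n => f n == key))) := by
  have hstep : (fun (g : PySem.Dict Int (List Int)) (n : Int) =>
      if g.contains (f n) then g.modify (f n) [] (fun l => l ++ [n]) else g.insert (f n) [n])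
      = fun (g : PySem.Dict Int (List Int)) (n : Int) => g.modify (f n) [] (fun l => l ++ [n]) := by
    funext g n
    by_cases h : g.contains (f n)
    · simp [h]
    · have h' : g.contains (f n) = false := by simpa using h
      simp only [h', Bool.false_eq_true, if_false, PySem.Dict.modify,
        PySem.Dict.getD_of_not_contains _ _ h', List.nil_append]
  simp only [hstep]
  rw [show (ns.foldl (fun g n => g.modify (f n) [] (fun l => l ++ [n])) PySem.Dict.empty)
      = ((ns.map (fun n => (f n, n))).foldl
          (fun d p => d.modify p.1 [] (fun l => l ++ [p.2])) PySem.Dict.empty) by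
    rw [List.foldl_map]]
  have hnd : ((ns.map (fun n => (f n, n))).foldl
      (fun d p => d.modify p.1 [] (fun l => l ++ [p.2])) PySem.Dict.empty).keys.Nodup :=
    PySem.Dict.nodup_keys_foldl_modify_key _ (fun p : Int × Int => p.1) [] (fun _ p v => v ++ [p.2]) _
      PySem.Dict.nodup_keys_empty
  rw [PySem.Dict.items_eq_map_keys _ hnd []]
  rw [PySem.Dict.keys_foldl_modify_key _ (fun p : Int × Int => p.1) [] (fun _ p v => v ++ [p.2])]
  have hkeys : PySem.Set.update (PySem.Dict.empty : PySem.Dict Int (List Int)).keys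
      ((ns.map (fun n => (f n, n))).map (fun p => p.1)) = PySem.List.dedup (ns.map f) := by
    rw [List.map_map, PySem.List.dedup_eq_ofList]
    exact PySem.Set.update_empty _
  rw [hkeys]
  refine List.map_congr_left (fun key _ => ?_)
  rw [PySem.Dict.getD_foldl_modify_append, PySem.Dict.getD_empty, List.nil_append]
  simp [List.filter_map, List.map_map, Function.comp_def]

-- B's dict comprehension over the deduped keys, in the same closed form
theorem pvGroupB_items (g : Int → Int) (ns : List Int) :
    ((PySem.List.dedup (ns.map g)).foldl (fun d key =>
        d.insert key (ns.foldl (fun acc n => if g n == key then acc ++ [n] else acc) []))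
      (PySem.Dict.empty)).items
    = (PySem.List.dedup (ns.map g)).map (fun key => (key, ns.filter (fun n => g n == key))) := by
  rw [PySem.Dict.items_foldl_insert_fresh _ (fun key => key)
      (fun key => ns.foldl (fun acc n => if g n == key then acc ++ [n] else acc) []) _
      (fun a _ => PySem.Dict.contains_empty a)
      (by simp)]
  simp only [PySem.Dict.empty, List.nil_append]
  refine List.map_congr_left (fun key _ => ?_)
  rw [PySem.List.foldl_append_if (fun n => g n == key) (fun n => n) ns []]
  simp

-- ===== VERDICT (by name: the statement is the Claim_ definition above) =====
theorem pvBitLen1_pos (n : Int) : 1 ≤ pvBitLen1 n := by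
  unfold pvBitLen1 pvBitLength
  split
  · norm_num
  · omega

theorem group_by_leading_bits_spec : Claim_equal_group_by_leading_bits := by
  intro ns k_max hDom hPre
  obtain ⟨hne, hnn, hk1⟩ := hPre
  unfold Spec_group_by_leading_bits
  have hdom : ∀ n ∈ ns, n ≤ 2147483648 := by
    intro n hn
    unfold Dom_group_by_leading_bits at hDom
    simp only [Bool.and_eq_true, List.all_eq_true, pvDomInt, decide_eq_true_eq] at hDom
    exact (hDom.1 n hn).2
  have hmap : ns.map (fun n => ((pvPyBin n).length : Int) - 2) = ns.map pvBitLen1 := by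
    refine List.map_congr_left (fun n hn => ?_)
    have h0 := hnn n hn
    have hbin : pvPyBin n = '0' :: 'b' :: pvBinDigits n.toNat := by
      simp [pvPyBin, not_lt.mpr h0]
    have h64 : n.toNat < 2 ^ 64 := by
      have := hdom n hn; omega
    have hlen := pvBinDigits_len n.toNat h64
    rw [Int.toNat_of_nonneg h0] at hlen
    rw [hbin]
    simp only [List.length_cons]
    rw [← hlen]
    push_cast
    ring
  simp only [group_by_leading_bits, group_by_leading_bits_alt, pv_most_bits]
  rw [hmap]
  set k : Int := min k_max ((PySem.List.max? (ns.map pvBitLen1) (fun x => x)).getD 0) with hkdef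
  -- k ≥ 1
  have hk : 1 ≤ k := by
    obtain ⟨n0, rest, rfl⟩ := List.exists_cons_of_ne_nil hne
    rcases hmax : PySem.List.max? ((n0 :: rest).map pvBitLen1) (fun x => x) with _ | m
    · rw [PySem.List.max?_eq_none_iff] at hmax
      simp at hmax
    · have h1 : pvBitLen1 n0 ≤ m :=
        PySem.List.max?_isMax hmax _ (by simp)
      have h2 := pvBitLen1_pos n0
      rw [hkdef, hmax]
      simp only [Option.getD_some, le_min_iff]
      exact ⟨hk1, by omega⟩
  -- per-element key agreement
  have hf : ∀ n ∈ ns, pv_leading_bits_value n k 16 = pvAltLeading k n := by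
    intro n hn
    refine pvLeading_eq n k (hnn n hn) ?_ hk
    have := hdom n hn
    calc n ≤ 2147483648 := this
      _ < 2 ^ 64 := by norm_num
  rw [pvGroupA_items (fun n => pv_leading_bits_value n k 16) ns,
      pvGroupB_items (pvAltLeading k) ns]
  rw [List.map_congr_left hf]
  refine List.map_congr_left (fun key _ => ?_)
  exact congrArg (Prod.mk key) (List.filter_congr (fun n hn => by rw [hf n hn]))
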